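-- pv_equiv track=rewrite | github.com/LeandrAnders0n/DSA- | Algorithms/max-confusion-exam.py | max_confusion
-- ===== SOURCE A (Python) =====
-- def max_confusion(answerKey,k):
--     # Store the count in the current sliding window
--     count = {"T": 0, "F": 0}
--     # Max count
--     max_result = 0
--     # Left Pointer
--     left = 0
--     # Temporary max count
--     result = 0
--     for right in range(len(answerKey)):
--         # Increment dictionary count
--         count[answerKey[right]] += 1
--         # If count of both 'T' and 'F' is more than 'K', ove the left pointer and decrement the left pointer's value
--         while count["T"] > k and count["F"] > k:
--             count[answerKey[left]] -= 1
--             left += 1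
--         # Sum of 'T' and 'F' values
--         result = count["T"] + count["F"]
--         # Max count of all values
--         max_result = max(max_result, result)
--     return max_result
-- ===== SOURCE B (Python) =====
-- def max_confusion(answerKey, k):
--     # Prefix-count + binary-search reimplementation: for each window end, binary-search
--     # the smallest valid left end (validity is monotone in the left end), no sliding state.
--     inc = {"T": 1, "F": 0}
--     n = len(answerKey)
--     prefT = [0]
--     t = 0
--     for ch in answerKey:
--         t += inc[ch]
--         prefT.append(t)
--     best = 0
--     for right in range(1, n + 1):
--         lo, hi = 0, right
--         while lo < hi:
--             mid = (lo + hi) // 2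
--             cntT = prefT[right] - prefT[mid]
--             cntF = (right - mid) - cntT
--             if cntT <= k or cntF <= k:
--                 hi = mid
--             else:
--                 lo = mid + 1
--         best = max(best, right - lo)
--     return best
-- ===== Notes on version B (the rewrite author's own statement) =====
-- stated objective: alternative
-- what changed: Replaces A's stateful dict-based sliding window by a prefix-count array plus, for each window end, a binary search for the smallest valid left end (validity is monotone in the left end), taking the max window length.
import Mathlib
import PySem

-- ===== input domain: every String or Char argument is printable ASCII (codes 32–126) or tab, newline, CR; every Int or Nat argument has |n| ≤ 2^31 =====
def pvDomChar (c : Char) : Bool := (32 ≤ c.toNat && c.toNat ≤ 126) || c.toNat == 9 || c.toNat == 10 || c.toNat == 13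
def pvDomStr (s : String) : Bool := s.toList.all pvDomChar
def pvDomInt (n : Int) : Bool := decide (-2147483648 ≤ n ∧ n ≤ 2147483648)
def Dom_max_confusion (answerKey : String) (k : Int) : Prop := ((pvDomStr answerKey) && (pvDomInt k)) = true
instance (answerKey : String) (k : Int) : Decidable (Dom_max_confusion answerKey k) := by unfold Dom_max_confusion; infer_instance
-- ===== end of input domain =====

-- B replaces A's stateful dict sliding window by a prefix-count array plus, per window end,
-- a binary search for the smallest valid left end; objective: alternative algorithm, same task.

-- ===== PORT A =====
-- Python's 'while' as fuel-bounded recursion; fuel s.length + 1 is enough on Pre_ (each iteration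
-- moves left by one and, with 0 ≤ k, the loop stops before left passes the window's right end).
def pvShrinkA (s : List Char) (k : Int) : Nat → PySem.Dict Char Int × Int → PySem.Dict Char Int × Int
  | 0, st => st
  | fuel + 1, (count, left) =>
    if count.getD 'T' 0 > k ∧ count.getD 'F' 0 > k then
      let c := PySem.List.pyGetD s left ' '        -- answerKey[left]; in range on Pre_
      pvShrinkA s k fuel (count.insert c (count.getD c 0 - 1), left + 1)
    else (count, left)

-- loop body of A; state = (count, max_result, left, result)
def pvStepA (s : List Char) (k : Int) (st : PySem.Dict Char Int × Int × Int × Int) (right : Int) :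
    PySem.Dict Char Int × Int × Int × Int :=
  let c := PySem.List.pyGetD s right ' '           -- answerKey[right]; right ∈ range(len) is in range
  let count := st.1.insert c (st.1.getD c 0 + 1)   -- count[answerKey[right]] += 1 (key present on Pre_)
  let p := pvShrinkA s k (s.length + 1) (count, st.2.2.1)
  let result := p.1.getD 'T' 0 + p.1.getD 'F' 0
  (p.1, max st.2.1 result, p.2, result)

def max_confusion (answerKey : String) (k : Int) : Int :=
  ((PySem.List.pyRange 0 (PySem.Str.len answerKey) 1).foldl
      (pvStepA answerKey.toList k)
      ((PySem.Dict.empty.insert 'T' 0).insert 'F' 0, 0, 0, 0)).2.1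

-- ===== PORT B =====
-- inc = {"T": 1, "F": 0}
def pvInc : PySem.Dict Char Int := (PySem.Dict.empty.insert 'T' 1).insert 'F' 0

-- the prefix list of running 'T' counts: Python starts with prefT = [0] and appends the running
-- total t after each character; this recursion emits the same list front to back
-- (inc[ch] ported total with getD; on Pre_ every ch is a key of inc, no KeyError)
def pvPref (t : Int) : List Char → List Int
  | [] => [t]
  | ch :: rest => t :: pvPref (t + pvInc.getD ch 0) rest

-- Python's 'while lo < hi' binary search as fuel-bounded recursion; fuel right.toNat is enough
-- since hi - lo starts as right and shrinks every iteration
def pvBisect (prefT : List Int) (k right : Int) : Nat → Int → Int → Int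
  | 0, lo, _ => lo
  | fuel + 1, lo, hi =>
    if lo < hi then
      let mid := PySem.Int.floordiv (lo + hi) 2
      let cntT := PySem.List.pyGetD prefT right 0 - PySem.List.pyGetD prefT mid 0   -- in range: 0 ≤ mid ≤ right ≤ n
      let cntF := (right - mid) - cntT
      if cntT ≤ k ∨ cntF ≤ k then pvBisect prefT k right fuel lo mid
      else pvBisect prefT k right fuel (mid + 1) hi
    else lo

def max_confusion_alt (answerKey : String) (k : Int) : Int :=
  let n := PySem.Str.len answerKey
  let prefT := pvPref 0 answerKey.toList
  (PySem.List.pyRange 1 (n + 1) 1).foldl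
    (fun best right => max best (right - pvBisect prefT k right right.toNat 0 right)) 0

-- ===== PRECONDITION & SPEC =====
-- Pre_ excludes exactly the inputs on which Python A raises: a character other than 'T'/'F'
-- (KeyError on the dict) or k < 0 with a nonempty string (the left pointer runs past the end of
-- the string: IndexError).
def Pre_max_confusion (answerKey : String) (k : Int) : Prop :=
  answerKey.toList.all (fun c => c == 'T' || c == 'F') = true ∧
  (0 ≤ k ∨ answerKey.toList.isEmpty = true)
instance (answerKey : String) (k : Int) : Decidable (Pre_max_confusion answerKey k) := by
  unfold Pre_max_confusion; infer_instance
def pvWitness_max_confusion : String × Int := ("TF", 1)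

def Spec_max_confusion (answerKey : String) (k : Int) (out : Int) : Prop := out = max_confusion_alt answerKey k
instance (answerKey : String) (k : Int) (out : Int) : Decidable (Spec_max_confusion answerKey k out) := by unfold Spec_max_confusion; infer_instance

-- ===== CLAIM (what is proved, stated in full; the proofs are below) =====
def Claim_equal_max_confusion : Prop := ∀ (answerKey : String) (k : Int), Dom_max_confusion answerKey k → Pre_max_confusion answerKey k → Spec_max_confusion answerKey k (max_confusion answerKey k)

-- ===== LEMMAS AND PROOFS =====

-- prefix count, as an Int
def pvP (s : List Char) (x : Char) (m : Nat) : Int := ((s.take m).count x : Int)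

-- the window [l, r) is acceptable for letter x (at most k copies of x)
def pvCond (s : List Char) (k : Int) (x : Char) (r l : Nat) : Prop := pvP s x r - pvP s x l ≤ k

-- the window [l, r) is acceptable for A's combined loop
def pvCondC (s : List Char) (k : Int) (r l : Nat) : Prop :=
  pvCond s k 'T' r l ∨ pvCond s k 'F' r l

-- the least acceptable left end (the value of the left pointer after processing s[0:r])
noncomputable def pvThrC (s : List Char) (k : Int) (r : Nat) : Nat :=
  sInf {l | pvCondC s k r l}

-- running max_result of A, after r iterations
noncomputable def pvBestC (s : List Char) (k : Int) : Nat → Int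
  | 0 => 0
  | r + 1 => max (pvBestC s k r) (((r : Int) + 1) - (pvThrC s k (r + 1) : Int))

theorem pvP_mono (s : List Char) (x : Char) {m m' : Nat} (h : m ≤ m') : pvP s x m ≤ pvP s x m' := by
  have : s.take m = (s.take m').take m := by rw [List.take_take, Nat.min_eq_left h]
  unfold pvP
  rw [this]
  exact_mod_cast (List.take_sublist _ _).count_le x

theorem pvP_succ (s : List Char) (x : Char) {m : Nat} (h : m < s.length) :
    pvP s x (m + 1) = pvP s x m + (if s[m] = x then 1 else 0) := by
  unfold pvP
  rw [List.take_add_one, List.getElem?_eq_getElem h, List.count_append]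
  simp [List.count_singleton]

theorem pvP_add (s : List Char) (hs : ∀ c ∈ s, c = 'T' ∨ c = 'F') :
    ∀ m : Nat, m ≤ s.length → pvP s 'T' m + pvP s 'F' m = (m : Int) := by
  intro m
  induction m with
  | zero => intro _; simp [pvP]
  | succ m ih =>
    intro h
    have hm : m < s.length := by omega
    rw [pvP_succ s 'T' hm, pvP_succ s 'F' hm]
    have hc := hs s[m] (List.getElem_mem hm)
    rcases hc with hc | hc <;> simp [hc] <;> push_cast <;> omega

theorem pvCond_mono_l (s : List Char) (k : Int) (x : Char) (r : Nat) {l l' : Nat} (h : l ≤ l')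
    (hc : pvCond s k x r l) : pvCond s k x r l' := by
  unfold pvCond at *
  have := pvP_mono s x h
  omega

theorem pvCondC_mono_l (s : List Char) (k : Int) (r : Nat) {l l' : Nat} (h : l ≤ l')
    (hc : pvCondC s k r l) : pvCondC s k r l' := by
  rcases hc with hc | hc
  · exact Or.inl (pvCond_mono_l s k 'T' r h hc)
  · exact Or.inr (pvCond_mono_l s k 'F' r h hc)

theorem pvCond_self (s : List Char) (k : Int) (x : Char) (r : Nat) (hk : 0 ≤ k) :
    pvCond s k x r r := by
  unfold pvCond; omega

theorem pvThrC_le (s : List Char) (k : Int) (r : Nat) {l : Nat}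
    (h : pvCondC s k r l) : pvThrC s k r ≤ l := Nat.sInf_le h

theorem pvCondC_thr (s : List Char) (k : Int) (r : Nat) (hk : 0 ≤ k) :
    pvCondC s k r (pvThrC s k r) := by
  have h : pvThrC s k r ∈ {l | pvCondC s k r l} := Nat.sInf_mem ⟨r, Or.inl (pvCond_self s k 'T' r hk)⟩
  exact h

theorem pvThrC_zero (s : List Char) (k : Int) (hk : 0 ≤ k) : pvThrC s k 0 = 0 :=
  Nat.le_zero.mp (pvThrC_le s k 0 (Or.inl (pvCond_self s k 'T' 0 hk)))

theorem pvShrinkA_spec (s : List Char) (k : Int) (hk : 0 ≤ k)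
    (hs : ∀ c ∈ s, c = 'T' ∨ c = 'F') (r : Nat) (hr : r ≤ s.length) :
    ∀ (fuel l : Nat) (d : PySem.Dict Char Int),
      l ≤ r → r - l ≤ fuel →
      d.getD 'T' 0 = pvP s 'T' r - pvP s 'T' l →
      d.getD 'F' 0 = pvP s 'F' r - pvP s 'F' l →
      (l ≤ pvThrC s k r ∨ pvCondC s k r l) →
      ∃ d', pvShrinkA s k fuel (d, (l : Int)) = (d', ((max l (pvThrC s k r) : Nat) : Int)) ∧
        d'.getD 'T' 0 = pvP s 'T' r - pvP s 'T' (max l (pvThrC s k r)) ∧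
        d'.getD 'F' 0 = pvP s 'F' r - pvP s 'F' (max l (pvThrC s k r)) := by
  intro fuel
  induction fuel with
  | zero =>
    intro l d hl hfuel hT hF _hstart
    have hlr : l = r := by omega
    subst hlr
    have hthr : pvThrC s k l ≤ l := pvThrC_le s k l (Or.inl (pvCond_self s k 'T' l hk))
    exact ⟨d, by simp [pvShrinkA, Nat.max_eq_left hthr], by rw [Nat.max_eq_left hthr]; exact hT,
      by rw [Nat.max_eq_left hthr]; exact hF⟩
  | succ fuel ih =>
    intro l d hl hfuel hT hF hstart
    by_cases hgt : d.getD 'T' 0 > k ∧ d.getD 'F' 0 > k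
    · -- loop body runs once more
      have hnc : ¬ pvCondC s k r l := by
        unfold pvCondC pvCond
        push_neg
        constructor <;> omega
      have hlt : l < pvThrC s k r := by
        by_contra hge
        exact hnc (pvCondC_mono_l s k r (by omega) (pvCondC_thr s k r hk))
      have hltr : l < r := by
        have : pvThrC s k r ≤ r := pvThrC_le s k r (Or.inl (pvCond_self s k 'T' r hk))
        omega
      have hls : l < s.length := by omega
      have hc : PySem.List.pyGetD s (l : Int) ' ' = s[l] := by
        rw [PySem.List.pyGetD_natCast]
        exact List.getD_eq_getElem s ' ' hls
      have hT2 : (d.insert s[l] (d.getD s[l] 0 - 1)).getD 'T' 0 = pvP s 'T' r - pvP s 'T' (l + 1) := by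
        rw [PySem.Dict.getD_insert, pvP_succ s 'T' hls]
        rcases hs s[l] (List.getElem_mem hls) with hcl | hcl <;> rw [hcl] <;> simp [hT, hF] <;> omega
      have hF2 : (d.insert s[l] (d.getD s[l] 0 - 1)).getD 'F' 0 = pvP s 'F' r - pvP s 'F' (l + 1) := by
        rw [PySem.Dict.getD_insert, pvP_succ s 'F' hls]
        rcases hs s[l] (List.getElem_mem hls) with hcl | hcl <;> rw [hcl] <;> simp [hT, hF] <;> omega
      obtain ⟨d', heq, h1, h2⟩ := ih (l + 1) (d.insert s[l] (d.getD s[l] 0 - 1))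
        (by omega) (by omega) hT2 hF2 (Or.inl (by omega))
      have hmax : max (l + 1) (pvThrC s k r) = max l (pvThrC s k r) := by omega
      refine ⟨d', ?_, by rw [← hmax]; exact h1, by rw [← hmax]; exact h2⟩
      rw [← hmax, ← heq]
      simp only [pvShrinkA, hgt, if_pos, hc]
      push_cast
      rfl
    · -- loop exits
      have hcnd : pvCondC s k r l := by
        unfold pvCondC pvCond
        rcases not_and_or.mp hgt with h | h
        · exact Or.inl (by omega)
        · exact Or.inr (by omega)
      have hthr : pvThrC s k r ≤ l := pvThrC_le s k r hcnd
      exact ⟨d, by simp [pvShrinkA, hgt, Nat.max_eq_left hthr], by rw [Nat.max_eq_left hthr]; exact hT,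
        by rw [Nat.max_eq_left hthr]; exact hF⟩

theorem pvPassA (s : List Char) (k : Int) (hk : 0 ≤ k)
    (hs : ∀ c ∈ s, c = 'T' ∨ c = 'F') :
    ∀ r : Nat, r ≤ s.length →
      ∃ d res, (PySem.List.pyRange 0 (r : Int) 1).foldl (pvStepA s k)
            ((PySem.Dict.empty.insert 'T' 0).insert 'F' 0, 0, 0, 0)
          = (d, pvBestC s k r, ((pvThrC s k r : Nat) : Int), res) ∧
        d.getD 'T' 0 = pvP s 'T' r - pvP s 'T' (pvThrC s k r) ∧
        d.getD 'F' 0 = pvP s 'F' r - pvP s 'F' (pvThrC s k r) := by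
  intro r
  induction r with
  | zero =>
    intro _
    refine ⟨(PySem.Dict.empty.insert 'T' 0).insert 'F' 0, 0, ?_, ?_, ?_⟩
    · simp [PySem.List.pyRange_one_eq_nil (le_refl (0 : Int)), pvThrC_zero s k hk, pvBestC]
    · rw [pvThrC_zero s k hk]; simp [pvP]; rfl
    · rw [pvThrC_zero s k hk]; simp [pvP]
  | succ r ih =>
    intro h
    have hrs : r < s.length := by omega
    obtain ⟨d, res, heq, hT, hF⟩ := ih (by omega)
    have hthr_r : pvThrC s k r ≤ r := pvThrC_le s k r (Or.inl (pvCond_self s k 'T' r hk))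
    have hthr_r1 : pvThrC s k (r + 1) ≤ r + 1 :=
      pvThrC_le s k (r + 1) (Or.inl (pvCond_self s k 'T' (r + 1) hk))
    have hmono : pvThrC s k r ≤ pvThrC s k (r + 1) := by
      apply pvThrC_le
      have hmT := pvP_mono s 'T' (show r ≤ r + 1 by omega)
      have hmF := pvP_mono s 'F' (show r ≤ r + 1 by omega)
      rcases pvCondC_thr s k (r + 1) hk with hcc | hcc
      · exact Or.inl (by unfold pvCond at *; omega)
      · exact Or.inr (by unfold pvCond at *; omega)
    have hc : PySem.List.pyGetD s ((r : Nat) : Int) ' ' = s[r] := by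
      rw [PySem.List.pyGetD_natCast]
      exact List.getD_eq_getElem s ' ' hrs
    have hT2 : (d.insert s[r] (d.getD s[r] 0 + 1)).getD 'T' 0
        = pvP s 'T' (r + 1) - pvP s 'T' (pvThrC s k r) := by
      rw [PySem.Dict.getD_insert, pvP_succ s 'T' hrs]
      rcases hs s[r] (List.getElem_mem hrs) with hcl | hcl <;> rw [hcl] <;> simp [hT, hF] <;> omega
    have hF2 : (d.insert s[r] (d.getD s[r] 0 + 1)).getD 'F' 0
        = pvP s 'F' (r + 1) - pvP s 'F' (pvThrC s k r) := by
      rw [PySem.Dict.getD_insert, pvP_succ s 'F' hrs]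
      rcases hs s[r] (List.getElem_mem hrs) with hcl | hcl <;> rw [hcl] <;> simp [hT, hF] <;> omega
    obtain ⟨d', heq', h1', h2'⟩ := pvShrinkA_spec s k hk hs (r + 1) h (s.length + 1)
      (pvThrC s k r) (d.insert s[r] (d.getD s[r] 0 + 1)) (by omega) (by omega) hT2 hF2
      (Or.inl hmono)
    have hmax : max (pvThrC s k r) (pvThrC s k (r + 1)) = pvThrC s k (r + 1) :=
      Nat.max_eq_right hmono
    rw [hmax] at heq' h1' h2'
    have hres : d'.getD 'T' 0 + d'.getD 'F' 0 = ((r : Int) + 1) - (pvThrC s k (r + 1) : Int) := by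
      rw [h1', h2']
      have e1 := pvP_add s hs (r + 1) h
      have e2 := pvP_add s hs (pvThrC s k (r + 1)) (by omega)
      push_cast at e1 e2 ⊢
      omega
    refine ⟨d', d'.getD 'T' 0 + d'.getD 'F' 0, ?_, h1', h2'⟩
    have hcast : ((r + 1 : Nat) : Int) = (r : Int) + 1 := by push_cast; ring
    rw [hcast, PySem.List.pyRange_one_succ_right (by positivity), List.foldl_append, heq]
    simp only [List.foldl_cons, List.foldl_nil]
    unfold pvStepA
    simp only [hc, heq']
    rw [pvBestC, hres]

-- ===== B-side lemmas =====

-- the prefix list holds t + (count of 'T' in the first m characters)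
theorem pvPref_getD (s : List Char) (hs : ∀ c ∈ s, c = 'T' ∨ c = 'F') :
    ∀ (t : Int) (m : Nat), m ≤ s.length →
    (pvPref t s).getD m 0 = t + pvP s 'T' m := by
  induction s with
  | nil =>
    intro t m h
    have hm0 : m = 0 := by simpa using h
    subst hm0
    simp [pvPref, pvP]
  | cons ch rest ih =>
    intro t m h
    cases m with
    | zero => simp [pvPref, pvP]
    | succ m =>
      have hm : m ≤ rest.length := by simpa using h
      have hrest : ∀ c ∈ rest, c = 'T' ∨ c = 'F' := fun c hc => hs c (List.mem_cons_of_mem ch hc)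
      have hinc : pvInc.getD ch 0 = (if ch == 'T' then 1 else 0) := by
        rcases hs ch List.mem_cons_self with hch | hch <;> subst hch <;> rfl
      have hstep : pvP (ch :: rest) 'T' (m + 1) = (if ch == 'T' then 1 else 0) + pvP rest 'T' m := by
        unfold pvP
        simp only [List.take_succ_cons, List.count_cons]
        by_cases hch : ch = 'T' <;> simp [hch] <;> push_cast <;> ring
      simp only [pvPref, List.getD_cons_succ]
      rw [ih hrest _ m hm, hstep, hinc]
      ring

-- the binary search computes the least acceptable left end
theorem pvBisect_spec (s : List Char) (k : Int) (hk : 0 ≤ k)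
    (hs : ∀ c ∈ s, c = 'T' ∨ c = 'F') (r : Nat) (hr : r ≤ s.length) :
    ∀ (fuel : Nat) (lo hi : Int), 0 ≤ lo → lo ≤ (pvThrC s k r : Int) →
      (pvThrC s k r : Int) ≤ hi → hi ≤ (r : Int) → (hi - lo).toNat ≤ fuel →
      pvBisect (pvPref 0 s) k (r : Int) fuel lo hi = (pvThrC s k r : Int) := by
  intro fuel
  induction fuel with
  | zero =>
    intro lo hi h0 hlo hhi hhir hfuel
    have : lo = (pvThrC s k r : Int) := by omega
    simp [pvBisect, this]
  | succ fuel ih =>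
    intro lo hi h0 hlo hhi hhir hfuel
    by_cases hlh : lo < hi
    · have hmid := PySem.Int.floordiv_two_mid_bounds (le_of_lt hlh)
      set mid := PySem.Int.floordiv (lo + hi) 2 with hmiddef
      have hmidlt : mid < hi := by
        rw [hmiddef, PySem.Int.floordiv_lt_iff_lt_mul (by omega)]
        omega
      have hmid0 : 0 ≤ mid := by omega
      have hmidr : mid ≤ (r : Int) := by omega
      have hmidnat : mid = ((mid.toNat : Nat) : Int) := by omega
      have hmtle : mid.toNat ≤ s.length := by omega
      have hcntT : PySem.List.pyGetD (pvPref 0 s) (r : Int) 0 - PySem.List.pyGetD (pvPref 0 s) mid 0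
          = pvP s 'T' r - pvP s 'T' mid.toNat := by
        rw [hmidnat, PySem.List.pyGetD_natCast, PySem.List.pyGetD_natCast,
          pvPref_getD s hs 0 r hr, pvPref_getD s hs 0 mid.toNat hmtle]
        simp only [Int.toNat_natCast]
        ring
      have hcntF : ((r : Int) - mid) - (pvP s 'T' r - pvP s 'T' mid.toNat)
          = pvP s 'F' r - pvP s 'F' mid.toNat := by
        have e1 := pvP_add s hs r hr
        have e2 := pvP_add s hs mid.toNat hmtle
        omega
      have hcond_iff : (pvP s 'T' r - pvP s 'T' mid.toNat ≤ k ∨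
          pvP s 'F' r - pvP s 'F' mid.toNat ≤ k) ↔ pvCondC s k r mid.toNat := by
        unfold pvCondC pvCond
        tauto
      simp only [pvBisect, if_pos hlh, ← hmiddef, hcntT, hcntF]
      by_cases hcnd : pvP s 'T' r - pvP s 'T' mid.toNat ≤ k ∨ pvP s 'F' r - pvP s 'F' mid.toNat ≤ k
      · have hthr : pvThrC s k r ≤ mid.toNat := pvThrC_le s k r (hcond_iff.mp hcnd)
        rw [if_pos hcnd]
        exact ih lo mid h0 hlo (by omega) (by omega) (by omega)
      · have hthr : mid.toNat < pvThrC s k r := by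
          by_contra hge
          exact hcnd (hcond_iff.mpr (pvCondC_mono_l s k r (by omega) (pvCondC_thr s k r hk)))
        rw [if_neg hcnd]
        exact ih (mid + 1) hi (by omega) (by omega) hhi hhir (by omega)
    · have heq : lo = (pvThrC s k r : Int) := by omega
      rw [heq] at hlh ⊢
      simp [pvBisect, hlh]

-- B's fold equals A's running maximum
theorem pvPassB (s : List Char) (k : Int) (hk : 0 ≤ k)
    (hs : ∀ c ∈ s, c = 'T' ∨ c = 'F') :
    ∀ r : Nat, r ≤ s.length →
      (PySem.List.pyRange 1 ((r : Int) + 1) 1).foldl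
        (fun best right => max best (right - pvBisect (pvPref 0 s) k right right.toNat 0 right)) 0
      = pvBestC s k r := by
  intro r
  induction r with
  | zero =>
    intro _
    simp [PySem.List.pyRange_one_eq_nil (le_refl (1 : Int)), pvBestC]
  | succ r ih =>
    intro h
    have hcast : ((r + 1 : Nat) : Int) = (r : Int) + 1 := by push_cast; ring
    have hsplit : PySem.List.pyRange 1 ((r : Int) + 1 + 1) 1
        = PySem.List.pyRange 1 ((r : Int) + 1) 1 ++ [(r : Int) + 1] :=
      PySem.List.pyRange_one_succ_right (by omega)
    have hthr1 : pvThrC s k (r + 1) ≤ r + 1 :=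
      pvThrC_le s k (r + 1) (Or.inl (pvCond_self s k 'T' (r + 1) hk))
    have hbis : pvBisect (pvPref 0 s) k ((r : Int) + 1) (((r : Int) + 1).toNat) 0 ((r : Int) + 1)
        = (pvThrC s k (r + 1) : Int) := by
      have h1 : ((r : Int) + 1) = (((r + 1 : Nat)) : Int) := by push_cast; ring
      rw [h1]
      exact pvBisect_spec s k hk hs (r + 1) h _ 0 _ (le_refl 0) (by omega)
        (by exact_mod_cast hthr1) (le_refl _) (by omega)
    rw [hcast, hsplit, List.foldl_append, ih (by omega)]
    simp only [List.foldl_cons, List.foldl_nil]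
    rw [hbis, pvBestC]

-- ===== VERDICT (by name: the statement is the Claim_ definition above) =====
theorem max_confusion_spec : Claim_equal_max_confusion := by
  intro answerKey k _hdom hpre
  unfold Spec_max_confusion max_confusion max_confusion_alt
  rcases hpre with ⟨hsb, hk | hnilb⟩
  · have hs : ∀ c ∈ answerKey.toList, c = 'T' ∨ c = 'F' := by simpa using hsb
    have hA := pvPassA answerKey.toList k hk hs answerKey.toList.length le_rfl
    obtain ⟨dA, res, hA, -⟩ := hA
    have hB := pvPassB answerKey.toList k hk hs answerKey.toList.length le_rfl
    have hlen : PySem.Str.len answerKey = (answerKey.toList.length : Int) := by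
      simp [PySem.Str.len_eq]
    simp only [hlen]
    rw [hA, hB]
  · have hnil : answerKey.toList = [] := by simpa using hnilb
    have hlen : PySem.Str.len answerKey = 0 := by
      simp [PySem.Str.len_eq, hnil]
    simp only [hlen]
    simp [PySem.List.pyRange_one_eq_nil (le_refl (0:Int)), PySem.List.pyRange_one_eq_nil (le_refl (1:Int))]
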